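-- pv_equiv track=rewrite | github.com/LllC-mmd/machine_learning | water2D_swmm_learner/FD.py | _less_order_m
-- ===== SOURCE A (Python) =====
-- def _inv_equal_order_m(d,m):
--     A = []
--     assert d >= 1 and m >= 0
--     if d == 1:
--         A = [[m,],]
--         return A
--     if m == 0:
--         for i in range(d):
--             A.append(0)
--         return [A,]
--     for k in range(m+1):
--         B = _inv_equal_order_m(d-1,m-k)
--         for b in B:
--             b.append(k)  # change B's element
--         A = A+B
--     return A
--
-- def _less_order_m(d,m):
--     A = []
--     for k in range(m+1):
--         B = _inv_equal_order_m(d,k)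
--         for b in B:
--             b.reverse()
--         B.sort()
--         B.reverse()
--         A.append(B)
--     return A
-- ===== SOURCE B (Python) =====
-- def _less_order_m(d, m):
--     # Directly enumerate, for each order k <= m, the d-part compositions of k
--     # in descending lexicographic order (no reversing/sorting pass needed).
--     def comps(d, k):
--         if d == 1:
--             return [[k]]
--         out = []
--         for first in range(k, -1, -1):
--             for rest in comps(d - 1, k - first):
--                 out.append([first] + rest)
--         return out
--     return [comps(d, k) for k in range(m + 1)]
-- ===== Notes on version B (the rewrite author's own statement) =====
-- stated objective: alternative
-- what changed: B enumerates each order's d-part compositions directly in descending lexicographic order by recursing on the first part from k down to 0, eliminating A's append-based recursive build and the per-group element-reverse/sort/reverse passes.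
import Mathlib
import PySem

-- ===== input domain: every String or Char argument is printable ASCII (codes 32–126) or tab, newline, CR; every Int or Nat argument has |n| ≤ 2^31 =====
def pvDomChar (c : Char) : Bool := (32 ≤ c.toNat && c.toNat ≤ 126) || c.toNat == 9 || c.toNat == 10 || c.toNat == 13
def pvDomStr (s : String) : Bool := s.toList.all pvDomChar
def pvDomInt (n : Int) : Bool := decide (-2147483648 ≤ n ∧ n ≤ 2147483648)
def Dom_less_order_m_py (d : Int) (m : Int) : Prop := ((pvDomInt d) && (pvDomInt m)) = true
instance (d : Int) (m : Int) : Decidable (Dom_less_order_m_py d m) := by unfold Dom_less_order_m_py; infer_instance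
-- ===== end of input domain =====

-- B enumerates each order's compositions directly in descending lexicographic order,
-- replacing A's recursive build + per-group reverse/sort/reverse (objective: alternative).

-- ===== PORT A =====
-- _inv_equal_order_m: recursion on d (d ≥ 1 and m ≥ 0 at every call reached under Pre_;
-- the d = 0 value is never used there since A's assert raises first).
def invA : Nat → Nat → List (List Int)
  | 0, _ => []
  | 1, m => [[(m : Int)]]
  | (d + 2), m =>
    if m = 0 then
      -- for i in range(d): A.append(0)
      [(List.range (d + 2)).foldl (fun A _ => A ++ [(0 : Int)]) []]
    else
      -- for k in range(m+1): B = _inv_equal_order_m(d-1, m-k); b.append(k) each; A = A + B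
      (List.range (m + 1)).foldl
        (fun A k => A ++ (invA (d + 1) (m - k)).map (fun b => b ++ [(k : Int)])) []

def less_order_m_py (d : Int) (m : Int) : List (List (List Int)) :=
  (PySem.List.pyRange 0 (m + 1) 1).foldl
    (fun A k =>
      let B := invA d.toNat k.toNat
      let B := B.map List.reverse          -- for b in B: b.reverse()
      -- B.sort(): Python's list.sort with lexicographic list comparison; the
      -- lexicographic LinearOrder instance on List Int is passed explicitly.
      let B := @PySem.List.sorted _ _ List.instLinearOrder.toLT LinearOrder.toDecidableLT B (fun x => x) false
      let B := B.reverse                   -- B.reverse()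
      A ++ [B]) []

-- ===== PORT B =====
-- comps d k: the d-part compositions of k, first part from k down to 0 (range(k, -1, -1)),
-- recursing on the remaining parts; descending lexicographic by construction.
def comps : Nat → Nat → List (List Int)
  | 0, _ => []
  | 1, k => [[(k : Int)]]
  | (d + 2), k =>
    ((List.range (k + 1)).reverse).foldl
      (fun out first => out ++ (comps (d + 1) (k - first)).map (fun rest => (first : Int) :: rest)) []

def less_order_m_py_alt (d : Int) (m : Int) : List (List (List Int)) :=
  (PySem.List.pyRange 0 (m + 1) 1).map (fun k => comps d.toNat k.toNat)

-- ===== PRECONDITION & SPEC =====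
-- Pre_ excludes exactly the inputs d < 1 with m ≥ 0, on which A raises AssertionError
-- (and B raises RecursionError); for m < 0 both return [] for any d.
def Pre_less_order_m_py (d : Int) (m : Int) : Prop := m < 0 ∨ 1 ≤ d
instance (d : Int) (m : Int) : Decidable (Pre_less_order_m_py d m) := by unfold Pre_less_order_m_py; infer_instance
def pvWitness_less_order_m_py : Int × Int := (3, 4)

def Spec_less_order_m_py (d : Int) (m : Int) (out : List (List (List Int))) : Prop := out = less_order_m_py_alt d m
instance (d : Int) (m : Int) (out : List (List (List Int))) : Decidable (Spec_less_order_m_py d m out) := by unfold Spec_less_order_m_py; infer_instance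

-- ===== CLAIM (what is proved, stated in full; the proofs are below) =====
def Claim_equal_less_order_m_py : Prop := ∀ (d : Int) (m : Int), Dom_less_order_m_py d m → Pre_less_order_m_py d m → Spec_less_order_m_py d m (less_order_m_py d m)

-- ===== LEMMAS AND PROOFS =====

-- comps d 0 = [replicate d 0] (d ≥ 1)
lemma comps_zero (d : Nat) (hd : 1 ≤ d) : comps d 0 = [List.replicate d 0] := by
  induction d with
  | zero => omega
  | succ n ih =>
    match n, ih with
    | 0, _ => simp [comps]
    | (n + 1), ih =>
      simp only [comps, List.range_succ]
      simp [ih (by omega), List.replicate_succ]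

-- the flatMap shape of comps for d ≥ 2, any k
lemma comps_succ_succ (d k : Nat) :
    comps (d + 2) k =
      ((List.range (k + 1)).reverse).flatMap
        (fun first => (comps (d + 1) (k - first)).map (fun rest => (first : Int) :: rest)) := by
  simp only [comps]
  rw [PySem.List.foldl_append_eq_flatMap, List.nil_append]

-- the flatMap shape of invA for d ≥ 2, k ≥ 1
lemma invA_succ_succ (d k : Nat) (hk : k ≠ 0) :
    invA (d + 2) k =
      (List.range (k + 1)).flatMap
        (fun j => (invA (d + 1) (k - j)).map (fun b => b ++ [(j : Int)])) := by
  simp only [invA, if_neg hk]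
  rw [PySem.List.foldl_append_eq_flatMap, List.nil_append]

-- permutation: elementwise reverse of A's group is a permutation of B's group
lemma invA_reverse_perm (d k : Nat) (hd : 1 ≤ d) :
    ((invA d k).map List.reverse).Perm (comps d k) := by
  induction d generalizing k with
  | zero => omega
  | succ n ih =>
    match n, ih with
    | 0, _ => simp [invA, comps]
    | (n + 1), ih =>
      by_cases hk : k = 0
      · subst hk
        have h0 : invA (n + 2) 0 = [List.replicate (n + 2) 0] := by
          simp [invA, List.map_const']
        rw [h0, comps_zero (n + 2) (by omega)]
        simp
      · rw [invA_succ_succ n k hk, comps_succ_succ]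
        rw [List.map_flatMap]
        have step1 :
            ((List.range (k + 1)).flatMap
              (fun j => ((invA (n + 1) (k - j)).map (fun b => b ++ [(j : Int)])).map List.reverse)).Perm
            ((List.range (k + 1)).flatMap
              (fun j => (comps (n + 1) (k - j)).map (fun rest => (j : Int) :: rest))) := by
          apply List.Perm.flatMap_left
          intro j _
          rw [List.map_map]
          have : (List.reverse ∘ fun b => b ++ [(j : Int)]) =
                 (fun rest => (j : Int) :: rest) ∘ List.reverse := by
            funext b; simp
          rw [this, ← List.map_map]
          exact (ih (k - j) (by omega)).map _
        refine step1.trans ?_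
        rw [List.flatMap_def, List.flatMap_def, List.map_reverse]
        exact (List.reverse_perm _).symm.flatten

-- B's groups are strictly descending lexicographically
lemma comps_pairwise_gt (d k : Nat) (hd : 1 ≤ d) :
    (comps d k).Pairwise (fun a b => b < a) := by
  induction d generalizing k with
  | zero => omega
  | succ n ih =>
    match n, ih with
    | 0, _ => simp [comps]
    | (n + 1), ih =>
      rw [comps_succ_succ]
      apply List.pairwise_flatMap.mpr
      refine ⟨?_, ?_⟩
      · intro first _
        apply List.Pairwise.map
        · intro a b hba
          exact List.Lex.cons hba
        · exact ih (k - first) (by omega)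
      · have hp : ((List.range (k + 1)).reverse).Pairwise (fun a b => b < a) := by
          rw [List.pairwise_reverse]
          exact List.pairwise_lt_range
        refine hp.imp ?_
        intro f1 f2 h a ha b hb
        simp only [List.mem_map] at ha hb
        obtain ⟨ra, _, rfl⟩ := ha
        obtain ⟨rb, _, rfl⟩ := hb
        exact List.Lex.rel (by exact_mod_cast h)

-- per-order group equality: A's reverse/sort/reverse pass yields exactly B's group
lemma group_eq (d k : Nat) (hd : 1 ≤ d) :
    (@PySem.List.sorted _ _ List.instLinearOrder.toLT LinearOrder.toDecidableLT
      ((invA d k).map List.reverse) (fun x => x) false).reverse = comps d k := by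
  have hperm : ((comps d k).reverse).Perm ((invA d k).map List.reverse) :=
    (List.reverse_perm _).trans (invA_reverse_perm d k hd).symm
  have hpair : ((comps d k).reverse).Pairwise (fun a b => (fun x => x) a < (fun x => x) b) := by
    simpa [List.pairwise_reverse] using comps_pairwise_gt d k hd
  have h := PySem.List.sorted_eq_of_perm_of_pairwise_lt _ _ _ hperm hpair
  rw [h, List.reverse_reverse]

-- ===== VERDICT (by name: the statement is the Claim_ definition above) =====
theorem less_order_m_py_spec : Claim_equal_less_order_m_py := by
  intro d m _ hpre
  unfold Spec_less_order_m_py less_order_m_py less_order_m_py_alt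
  rw [PySem.List.foldl_append_singleton_eq_map]
  rw [List.nil_append]
  apply List.map_congr_left
  intro k hk
  have hk0 : 0 ≤ k ∧ k < m + 1 := by
    have := (PySem.List.mem_pyRange_one (a := 0) (b := m + 1) (x := k)).mp hk
    omega
  have hd : 1 ≤ d.toNat := by
    rcases hpre with h | h
    · omega
    · omega
  exact group_eq d.toNat k.toNat hd
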